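-- pv_equiv track=rewrite | github.com/kodxana/OhMyRunPod-python | OhMyRunPod/modules/ssh_setup/ssh_setup.py | _set_directives_idempotent
-- ===== SOURCE A (Python) =====
-- def _set_directives_idempotent(lines, directives):
--     """Return new sshd_config content lines with directives set before any Match blocks.
--
--     Removes existing occurrences of these directives outside Match blocks,
--     then inserts desired directives before first Match block (or at end).
--     """
--     out = []
--     in_match = False
--     inserted = False
--     cleaned = []
--     keys = {k.lower() for k in directives.keys()}
--     for line in lines:
--         stripped = line.strip()
--         if stripped.lower().startswith("match "):
--             in_match = True
--         if not stripped or stripped.startswith("#"):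
--             cleaned.append(line)
--             continue
--         key = stripped.split()[0].lower()
--         if key in keys and not in_match:
--             # skip existing directive outside Match; we'll add ours
--             continue
--         cleaned.append(line)
--
--     # Find insertion point
--     for idx, line in enumerate(cleaned):
--         if line.strip().lower().startswith("match "):
--             new_block = [f"{k} {v}\n" for k, v in directives.items()]
--             out = cleaned[:idx] + new_block + cleaned[idx:]
--             inserted = True
--             break
--     if not inserted:
--         out = cleaned + ["\n"] + [f"{k} {v}\n" for k, v in directives.items()]
--     return out
-- ===== SOURCE B (Python) =====
-- def _set_directives_idempotent(lines, directives):
--     """One fused pass: emit the result directly, returning early at the first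
--     Match line with the new block spliced in before the untouched remainder;
--     no intermediate cleaned list, no state flag, no second scan."""
--     keys = {k.lower() for k in directives}
--     block = [f"{k} {v}\n" for k, v in directives.items()]
--     out = []
--     for i, line in enumerate(lines):
--         s = line.strip()
--         if s.lower().startswith("match "):
--             return out + block + lines[i:]
--         if s and not s.startswith("#") and s.split()[0].lower() in keys:
--             continue
--         out.append(line)
--     return out + ["\n"] + block
-- ===== Notes on version B (the rewrite author's own statement) =====
-- stated objective: alternative
-- what changed: A builds a full 'cleaned' copy with an in_match flag and then rescans it to find an insertion index and splices; B is one fused pass that emits the result directly and returns early the moment the first Match line is reached (block ++ untouched remainder), so there is no intermediate cleaned list, no flag carried past the boundary, and no second scan.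
import Mathlib
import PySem

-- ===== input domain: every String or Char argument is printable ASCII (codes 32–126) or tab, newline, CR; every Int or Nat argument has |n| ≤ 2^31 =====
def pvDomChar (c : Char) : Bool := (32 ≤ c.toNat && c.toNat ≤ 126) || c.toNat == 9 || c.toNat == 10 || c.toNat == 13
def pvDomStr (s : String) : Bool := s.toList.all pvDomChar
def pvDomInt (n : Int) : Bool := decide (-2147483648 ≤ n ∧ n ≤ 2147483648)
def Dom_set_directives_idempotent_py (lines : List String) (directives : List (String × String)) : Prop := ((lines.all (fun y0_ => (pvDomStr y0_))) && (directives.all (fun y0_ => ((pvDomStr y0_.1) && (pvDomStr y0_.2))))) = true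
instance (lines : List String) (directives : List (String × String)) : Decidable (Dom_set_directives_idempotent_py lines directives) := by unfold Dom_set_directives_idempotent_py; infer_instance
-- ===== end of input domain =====

-- B replaces A's build-cleaned-then-rescan (state flag + second indexed scan) with a single
-- fused pass that emits the output directly and returns early at the first Match line
-- (objective: alternative decomposition, same cost).


-- ===== PORT A =====
-- loop body of A's first `for line in lines` loop; state = (in_match, cleaned)
def pvBodyA (keys : PySem.Set String) (st : Bool × List String) (line : String) : Bool × List String :=
  let stripped := PySem.Str.strip line
  let in_match := if PySem.Str.startswith (PySem.Str.lower stripped) "match " then true else st.1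
  if (stripped == "") || PySem.Str.startswith stripped "#" then
    (in_match, st.2 ++ [line])
  else
    -- stripped.split()[0]: stripped is non-empty here, so index 0 is in range (IndexError impossible)
    let key := PySem.Str.lower (PySem.List.pyGetD (PySem.Str.split₀ stripped) 0 "")
    if PySem.Set.contains keys key && !in_match then
      (in_match, st.2)
    else
      (in_match, st.2 ++ [line])

-- A's second loop: `for idx, line in enumerate(cleaned): if …: break` returning the break index
def pvFindA : Nat → List String → Option Nat
  | _, [] => none
  | idx, line :: rest =>
      if PySem.Str.startswith (PySem.Str.lower (PySem.Str.strip line)) "match " then some idx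
      else pvFindA (idx + 1) rest

def set_directives_idempotent_py (lines : List String) (directives : List (String × String)) : List String :=
  -- keys = {k.lower() for k in directives.keys()}
  let keys : PySem.Set String := PySem.Set.ofList (directives.map (fun kv => PySem.Str.lower kv.1))
  let cleaned := (lines.foldl (pvBodyA keys) (false, [])).2
  match pvFindA 0 cleaned with
  | some idx =>
      let new_block := directives.map (fun kv => kv.1 ++ " " ++ kv.2 ++ "\n")
      -- cleaned[:idx] ++ new_block ++ cleaned[idx:]  (idx ≥ 0, so the slices are take/drop)
      cleaned.take idx ++ new_block ++ cleaned.drop idx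
  | none =>
      cleaned ++ ["\n"] ++ directives.map (fun kv => kv.1 ++ " " ++ kv.2 ++ "\n")

-- ===== PORT B =====
-- B's single fused loop; `out` is the accumulator; at position i the remaining
-- lines `line :: rest` are exactly Python's `lines[i:]`, so the early return
-- `out + block + lines[i:]` is `out ++ block ++ (line :: rest)`.
def pvGoB (keys : PySem.Set String) (block : List String) (out : List String) : List String → List String
  | [] => out ++ ["\n"] ++ block
  | line :: rest =>
      let s := PySem.Str.strip line
      if PySem.Str.startswith (PySem.Str.lower s) "match " then
        out ++ block ++ (line :: rest)
      else if !(s == "") && !PySem.Str.startswith s "#" &&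
              PySem.Set.contains keys (PySem.Str.lower (PySem.List.pyGetD (PySem.Str.split₀ s) 0 "")) then
        pvGoB keys block out rest
      else
        pvGoB keys block (out ++ [line]) rest

def set_directives_idempotent_py_alt (lines : List String) (directives : List (String × String)) : List String :=
  let keys : PySem.Set String := PySem.Set.ofList (directives.map (fun kv => PySem.Str.lower kv.1))
  let block := directives.map (fun kv => kv.1 ++ " " ++ kv.2 ++ "\n")
  pvGoB keys block [] lines

-- ===== PRECONDITION & SPEC =====
def Spec_set_directives_idempotent_py (lines : List String) (directives : List (String × String)) (out : List String) : Prop := out = set_directives_idempotent_py_alt lines directives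
instance (lines : List String) (directives : List (String × String)) (out : List String) : Decidable (Spec_set_directives_idempotent_py lines directives out) := by unfold Spec_set_directives_idempotent_py; infer_instance

-- ===== CLAIM (what is proved, stated in full; the proofs are below) =====
def Claim_equal_set_directives_idempotent_py : Prop := ∀ (lines : List String) (directives : List (String × String)), Dom_set_directives_idempotent_py lines directives → Spec_set_directives_idempotent_py lines directives (set_directives_idempotent_py lines directives)

-- ===== LEMMAS AND PROOFS =====

def pvIsMatchB (line : String) : Bool :=
  PySem.Str.startswith (PySem.Str.lower (PySem.Str.strip line)) "match "

def pvKeepB (keys : PySem.Set String) (line : String) : Bool :=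
  let s := PySem.Str.strip line
  (s == "") || PySem.Str.startswith s "#" ||
    !(PySem.Set.contains keys (PySem.Str.lower (PySem.List.pyGetD (PySem.Str.split₀ s) 0 "")))

-- A-side: once in_match is true, every remaining line is appended unchanged
theorem pvFoldA_true (keys : PySem.Set String) (ls : List String) (acc : List String) :
    ls.foldl (pvBodyA keys) (true, acc) = (true, acc ++ ls) := by
  induction ls generalizing acc with
  | nil => simp
  | cons l ls ih =>
      have hbody : pvBodyA keys (true, acc) l = (true, acc ++ [l]) := by
        simp only [pvBodyA]
        split_ifs <;> simp_all
      simp [List.foldl_cons, hbody, ih]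

-- A-side: while no Match line has been seen, the loop filters by pvKeepB
theorem pvFoldA_false (keys : PySem.Set String) (ls : List String) (acc : List String)
    (h : ∀ x ∈ ls, pvIsMatchB x = false) :
    ls.foldl (pvBodyA keys) (false, acc) = (false, acc ++ ls.filter (pvKeepB keys)) := by
  induction ls generalizing acc with
  | nil => simp
  | cons l ls ih =>
      have hl : pvIsMatchB l = false := h l (by simp)
      have hbody : pvBodyA keys (false, acc) l =
          (false, acc ++ if pvKeepB keys l then [l] else []) := by
        simp only [pvBodyA, pvKeepB, pvIsMatchB] at hl ⊢
        rw [hl]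
        split_ifs with h1 h2 <;> simp_all
      rw [List.foldl_cons, hbody, ih _ (fun x hx => h x (by simp [hx]))]
      by_cases hk : pvKeepB keys l = true <;> simp [hk]

-- A-side: the first Match line flips the flag and is itself kept
theorem pvBodyA_match (keys : PySem.Set String) (acc : List String) (l : String)
    (h : pvIsMatchB l = true) :
    pvBodyA keys (false, acc) l = (true, acc ++ [l]) := by
  simp only [pvBodyA, pvIsMatchB] at h ⊢
  rw [h]
  split_ifs <;> simp_all

theorem pvFindA_none (n : Nat) (ls : List String)
    (h : ∀ x ∈ ls, pvIsMatchB x = false) : pvFindA n ls = none := by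
  induction ls generalizing n with
  | nil => rfl
  | cons l ls ih =>
      have hl := h l (by simp)
      simp only [pvIsMatchB] at hl
      simp at hl
      simp [pvFindA, hl, ih _ (fun x hx => h x (by simp [hx]))]

theorem pvFindA_some (n : Nat) (pre : List String) (l : String) (suf : List String)
    (hpre : ∀ x ∈ pre, pvIsMatchB x = false) (hl : pvIsMatchB l = true) :
    pvFindA n (pre ++ l :: suf) = some (n + pre.length) := by
  induction pre generalizing n with
  | nil =>
      simp only [pvIsMatchB] at hl
      simp at hl
      simp [pvFindA, hl]
  | cons p pre ih =>
      have hp := hpre p (by simp)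
      simp only [pvIsMatchB] at hp
      simp at hp
      simp [pvFindA, hp, ih _ (fun x hx => hpre x (by simp [hx]))]
      omega

-- B-side: one step of pvGoB on a non-Match line
theorem pvGoB_step (keys : PySem.Set String) (block out : List String) (l : String)
    (rest : List String) (hl : pvIsMatchB l = false) :
    pvGoB keys block out (l :: rest) =
      pvGoB keys block (out ++ if pvKeepB keys l then [l] else []) rest := by
  simp only [pvGoB, pvKeepB, pvIsMatchB] at hl ⊢
  rw [hl]
  split_ifs with h1 <;> simp_all

-- B-side: no Match line at all
theorem pvGoB_nomatch (keys : PySem.Set String) (block : List String) (ls out : List String)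
    (h : ∀ x ∈ ls, pvIsMatchB x = false) :
    pvGoB keys block out ls = out ++ ls.filter (pvKeepB keys) ++ ["\n"] ++ block := by
  induction ls generalizing out with
  | nil => simp [pvGoB]
  | cons l ls ih =>
      rw [pvGoB_step keys block out l ls (h l (by simp)),
        ih _ (fun x hx => h x (by simp [hx]))]
      by_cases hk : pvKeepB keys l = true <;> simp [hk]

-- B-side: the early return at the first Match line
theorem pvGoB_match (keys : PySem.Set String) (block : List String) (pre : List String)
    (l : String) (suf out : List String)
    (hpre : ∀ x ∈ pre, pvIsMatchB x = false) (hl : pvIsMatchB l = true) :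
    pvGoB keys block out (pre ++ l :: suf) =
      out ++ pre.filter (pvKeepB keys) ++ block ++ l :: suf := by
  induction pre generalizing out with
  | nil =>
      simp only [pvIsMatchB] at hl
      simp only [List.nil_append, pvGoB, hl, if_true]
      simp
  | cons p pre ih =>
      rw [List.cons_append, pvGoB_step keys block out p _ (hpre p (by simp)),
        ih _ (fun x hx => hpre x (by simp [hx]))]
      by_cases hk : pvKeepB keys p = true <;> simp [hk]

-- ===== VERDICT (by name: the statement is the Claim_ definition above) =====
theorem set_directives_idempotent_py_spec : Claim_equal_set_directives_idempotent_py := by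
  intro lines directives _
  unfold Spec_set_directives_idempotent_py
  unfold set_directives_idempotent_py set_directives_idempotent_py_alt
  set keys : PySem.Set String := PySem.Set.ofList (directives.map (fun kv => PySem.Str.lower kv.1)) with hkeys
  set block : List String := directives.map (fun kv => kv.1 ++ " " ++ kv.2 ++ "\n") with hblock
  cases hfind : lines.findIdx? pvIsMatchB with
  | none =>
      rw [List.findIdx?_eq_none_iff] at hfind
      have hclean : (lines.foldl (pvBodyA keys) (false, [])).2 = lines.filter (pvKeepB keys) := by
        rw [pvFoldA_false keys lines [] hfind]; simp
      have hnone : pvFindA 0 (lines.filter (pvKeepB keys)) = none :=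
        pvFindA_none 0 _ (fun x hx => hfind x (List.mem_of_mem_filter hx))
      rw [pvGoB_nomatch keys block lines [] hfind]
      simp only [hclean, hnone]
      simp
  | some m =>
      rw [List.findIdx?_eq_some_iff_getElem] at hfind
      obtain ⟨hm, hpm, hmin⟩ := hfind
      have hpre : ∀ x ∈ lines.take m, pvIsMatchB x = false := by
        intro x hx
        obtain ⟨j, hj, rfl⟩ := List.mem_take_iff_getElem.mp hx
        have hjm : j < m := by omega
        have := hmin j hjm
        simpa using this
      have hsplit : lines = lines.take m ++ lines[m] :: lines.drop (m + 1) := by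
        conv_lhs => rw [← List.take_append_drop m lines]
        rw [List.drop_eq_getElem_cons hm]
      have hclean : (lines.foldl (pvBodyA keys) (false, [])).2 =
          (lines.take m).filter (pvKeepB keys) ++ lines[m] :: lines.drop (m + 1) := by
        conv_lhs => rw [hsplit]
        rw [List.foldl_append, pvFoldA_false keys _ [] hpre, List.foldl_cons,
          pvBodyA_match keys _ _ hpm, pvFoldA_true]
        simp
      have hfa : pvFindA 0 ((lines.take m).filter (pvKeepB keys) ++ lines[m] :: lines.drop (m + 1))
          = some ((lines.take m).filter (pvKeepB keys)).length := by
        rw [pvFindA_some 0 _ _ _ (fun x hx => hpre x (List.mem_of_mem_filter hx)) hpm]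
        simp
      have hgo : pvGoB keys block [] lines =
          (lines.take m).filter (pvKeepB keys) ++ block ++ lines[m] :: lines.drop (m + 1) := by
        conv_lhs => rw [hsplit]
        rw [pvGoB_match keys block _ _ _ [] hpre hpm]
        simp
      simp only [hclean, hfa, hgo, List.take_left, List.drop_left]
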